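-- pv_equiv track=rewrite | github.com/namanmuktha/libgenbot | book_downloader_sp.py | filter_books
-- ===== SOURCE A (Python) =====
-- def filter_books(books):
--     unique_books = {}
--
--     for book in books:
--         title = book['name']
--         if title not in unique_books:
--             unique_books[title] = book
--         else:
--             existing_book = unique_books[title]
--             if (book['year'] > existing_book['year'] and book['format'].lower() == 'pdf') or \
--                (book['format'].lower() == 'pdf' and existing_book['format'].lower() != 'pdf'):
--                 unique_books[title] = book
--
--     return list(unique_books.values())
-- ===== SOURCE B (Python) =====
-- def filter_books(books):
--     groups = {}
--     for book in books:
--         groups.setdefault(book['name'], []).append(book)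
--     result = []
--     for group in groups.values():
--         if len(group) == 1:
--             result.append(group[0])
--             continue
--         pdfs = [b for b in group if b['format'].lower() == 'pdf']
--         if pdfs:
--             result.append(max(pdfs, key=lambda b: b['year']))
--         else:
--             result.append(group[0])
--     return result
-- ===== Notes on version B (the rewrite author's own statement) =====
-- stated objective: alternative
-- what changed: Replaces the single fold that merges each book into a champion dict with a two-pass build-table-then-reduce decomposition: first group books by title in an insertion-ordered dict, then pick per group the first max-year PDF (max with key), or the first-seen book for PDF-less or singleton groups.
import Mathlib
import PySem

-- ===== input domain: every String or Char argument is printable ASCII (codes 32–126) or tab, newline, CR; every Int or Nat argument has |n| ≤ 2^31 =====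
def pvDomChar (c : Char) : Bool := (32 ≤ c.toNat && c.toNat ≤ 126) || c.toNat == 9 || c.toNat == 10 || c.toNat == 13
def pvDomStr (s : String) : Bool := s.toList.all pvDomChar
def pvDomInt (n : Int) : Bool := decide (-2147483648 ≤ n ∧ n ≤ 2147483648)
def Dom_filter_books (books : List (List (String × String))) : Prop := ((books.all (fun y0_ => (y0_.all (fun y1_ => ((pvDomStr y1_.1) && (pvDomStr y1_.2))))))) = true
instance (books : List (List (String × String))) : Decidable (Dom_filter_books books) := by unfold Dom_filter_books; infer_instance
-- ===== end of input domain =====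

-- B replaces A's inline merging fold with a build-groups-then-reduce decomposition (same cost, no speed claim).

-- book['k'] for an association-list book (first match, "" only reached outside Pre_)
def pvGetStr (b : List (String × String)) (k : String) : String :=
  (List.lookup k b).getD ""

-- book['format'].lower() == 'pdf'
def pvIsPdf (b : List (String × String)) : Bool :=
  PySem.Str.lower (pvGetStr b "format") == "pdf"

-- book['year'] as code points (Python str comparison = Lean '<' on List Char)
def pvYear (b : List (String × String)) : List Char :=
  (pvGetStr b "year").toList

-- ===== PORT A =====
def filter_books (books : List (List (String × String))) : List (List (String × String)) :=
  (books.foldl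
    (fun (unique_books : PySem.Dict String (List (String × String))) book =>
      let title := pvGetStr book "name"
      if ¬ (unique_books.contains title) then
        unique_books.insert title book
      else
        let existing_book := (unique_books.get? title).getD []
        if (PySem.Chars.strLt (pvYear existing_book) (pvYear book) && pvIsPdf book)
            || (pvIsPdf book && (PySem.Str.lower (pvGetStr existing_book "format") != "pdf")) then
          unique_books.insert title book
        else
          unique_books)
    PySem.Dict.empty).values

-- ===== PORT B =====
def filter_books_alt (books : List (List (String × String))) : List (List (String × String)) :=
  let groups : PySem.Dict String (List (List (String × String))) :=
    books.foldl (fun g book => g.modify (pvGetStr book "name") [] (· ++ [book])) PySem.Dict.empty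
  groups.values.foldl
    (fun result group =>
      if group.length == 1 then
        result ++ [group.headD []]
      else
        let pdfs := group.filter pvIsPdf
        match PySem.List.max? pdfs pvYear with
        | some m => result ++ [m]
        | none => result ++ [group.headD []])
    []

-- ===== PRECONDITION & SPEC =====
-- Pre_ excludes books missing a 'name' key and duplicate-titled books missing 'year' or 'format':
-- on those both programs raise KeyError, except where A's short-circuit evaluation happens to skip
-- the missing key while B reads it (see the cite in the claim).
def Pre_filter_books (books : List (List (String × String))) : Prop :=
  ∀ b ∈ books, (List.lookup "name" b).isSome ∧
    (2 ≤ (books.filter (fun b2 => List.lookup "name" b2 == List.lookup "name" b)).length →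
      (List.lookup "year" b).isSome ∧ (List.lookup "format" b).isSome)
instance (books : List (List (String × String))) : Decidable (Pre_filter_books books) := by unfold Pre_filter_books; infer_instance

def pvWitness_filter_books : (List (List (String × String))) :=
  [[("name", "a"), ("year", "1999"), ("format", "pdf")],
   [("name", "a"), ("year", "2004"), ("format", "PDF")],
   [("name", "b"), ("year", "2001"), ("format", "epub")]]

def Spec_filter_books (books : List (List (String × String))) (out : List (List (String × String))) : Prop := out = filter_books_alt books
instance (books : List (List (String × String))) (out : List (List (String × String))) : Decidable (Spec_filter_books books out) := by unfold Spec_filter_books; infer_instance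

-- ===== CLAIM (what is proved, stated in full; the proofs are below) =====
def Claim_equal_filter_books : Prop := ∀ (books : List (List (String × String))), Dom_filter_books books → Pre_filter_books books → Spec_filter_books books (filter_books books)

-- ===== LEMMAS AND PROOFS =====

-- B's per-group choice, as a function (definitionally the body of B's second fold)
def pvSelect (grp : List (List (String × String))) : List (String × String) :=
  match PySem.List.max? (grp.filter pvIsPdf) pvYear with
  | some m => m
  | none => grp.headD []

-- A's replacement test, as a function
def pvCond (e b : List (String × String)) : Bool :=
  (PySem.Chars.strLt (pvYear e) (pvYear b) && pvIsPdf b)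
    || (pvIsPdf b && (PySem.Str.lower (pvGetStr e "format") != "pdf"))

-- (title, group) ↦ (title, A's champion for the group)
def pvF (p : String × List (List (String × String))) : String × List (String × String) :=
  (p.1, pvSelect p.2)

theorem max?_append_singleton {α κ : Type} [LT κ] [DecidableLT κ] (xs : List α) (key : α → κ) (b : α) :
    PySem.List.max? (xs ++ [b]) key
      = match PySem.List.max? xs key with
        | none => some b
        | some m => if key m < key b then some b else some m := by
  simp only [PySem.List.max?, List.foldl_append, List.foldl_cons, List.foldl_nil]
  rfl

theorem pvSelect_append (grp : List (List (String × String))) (h : grp ≠ []) (b : List (String × String)) :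
    pvSelect (grp ++ [b]) = if pvCond (pvSelect grp) b then b else pvSelect grp := by
  obtain ⟨x, t, rfl⟩ := List.exists_cons_of_ne_nil h
  cases hb : pvIsPdf b with
  | false =>
    have hcond : ∀ e, pvCond e b = false := by intro e; simp [pvCond, hb]
    have hf : ((x :: t) ++ [b]).filter pvIsPdf = (x :: t).filter pvIsPdf := by
      simp [List.filter_cons, List.filter_append, hb]
    simp only [pvSelect, hf, hcond, Bool.false_eq_true, if_false]
    cases PySem.List.max? ((x :: t).filter pvIsPdf) pvYear <;> simp
  | true =>
    have hf : ((x :: t) ++ [b]).filter pvIsPdf = (x :: t).filter pvIsPdf ++ [b] := by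
      simp only [List.filter_cons, List.filter_append, List.filter_nil, hb]
      split <;> simp
    simp only [pvSelect, hf, max?_append_singleton]
    have hb' : PySem.Str.lower (pvGetStr b "format") = "pdf" := by simpa [pvIsPdf] using hb
    cases hmax : PySem.List.max? ((x :: t).filter pvIsPdf) pvYear with
    | none =>
      have hfil : (x :: t).filter pvIsPdf = [] := (PySem.List.max?_eq_none_iff _ _).mp hmax
      have hx : pvIsPdf x = false := by
        have := List.filter_eq_nil_iff.mp hfil x (by simp)
        simpa using this
      have : pvCond x b = true := by
        simp [pvCond, pvIsPdf] at hx ⊢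
        simp [hx, hb']
      simp [this]
    | some m =>
      have hm : pvIsPdf m = true := (List.mem_filter.mp (PySem.List.max?_mem hmax)).2
      have : pvCond m b = (PySem.Chars.strLt (pvYear m) (pvYear b)) := by
        simp [pvCond, pvIsPdf] at hm ⊢
        simp [hm, hb']
      simp only [this, PySem.Chars.strLt]
      by_cases hlt : pvYear m < pvYear b <;> simp [hlt]


theorem pvSelect_single (b : List (String × String)) : pvSelect [b] = b := by
  cases hb : pvIsPdf b <;> simp [pvSelect, PySem.List.max?, List.filter, hb]

theorem step_items (l : List (String × List (List (String × String))))
    (hnd : (l.map Prod.fst).Nodup) (hne : ∀ p ∈ l, p.2 ≠ []) (book : List (String × String)) :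
    (let title := pvGetStr book "name"
     if ¬ ((PySem.Dict.mk (l.map pvF)).contains title) then
       (PySem.Dict.mk (l.map pvF)).insert title book
     else
       let existing_book := ((PySem.Dict.mk (l.map pvF)).get? title).getD []
       if (PySem.Chars.strLt (pvYear existing_book) (pvYear book) && pvIsPdf book)
           || (pvIsPdf book && (PySem.Str.lower (pvGetStr existing_book "format") != "pdf")) then
         (PySem.Dict.mk (l.map pvF)).insert title book
       else
         PySem.Dict.mk (l.map pvF))
    = ⟨(((PySem.Dict.mk l).modify (pvGetStr book "name") [] (· ++ [book])).items).map pvF⟩ := by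
  simp only []
  have hkey : (fun (p : String × List (String × String)) => p.1 == pvGetStr book "name") ∘ pvF
      = (fun p => p.1 == pvGetStr book "name") := rfl
  have hcont : (PySem.Dict.mk (l.map pvF)).contains (pvGetStr book "name")
      = (PySem.Dict.mk l).contains (pvGetStr book "name") := by
    simp [PySem.Dict.contains, List.any_map, hkey]
  cases hc : (PySem.Dict.mk l).contains (pvGetStr book "name") with
  | false =>
    have hfind : l.find? (fun p => p.1 == pvGetStr book "name") = none := by
      rw [List.find?_eq_none]
      intro p hp
      simp [PySem.Dict.contains, List.any_eq_false] at hc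
      simpa using hc p.1 p.2 hp
    simp only [hcont, hc, Bool.not_false, if_true, PySem.Dict.modify, PySem.Dict.getD,
      PySem.Dict.get?, hfind, PySem.Dict.insert, hcont, hc, Bool.false_eq_true, if_false]
    simp [PySem.Dict.contains, List.any_map, hkey, PySem.Dict.insert, pvF, pvSelect_single]
  | true =>
    have hsome : (l.find? (fun p => p.1 == pvGetStr book "name")).isSome := by
      rw [List.find?_isSome]
      simpa [PySem.Dict.contains, List.any_eq_true] using hc
    obtain ⟨p0, hfind⟩ := Option.isSome_iff_exists.mp hsome
    have hp0mem := List.mem_of_find?_eq_some hfind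
    have hp0t : p0.1 = pvGetStr book "name" := by simpa using List.find?_some hfind
    have hgrp : p0.2 ≠ [] := hne p0 hp0mem
    have huniq : ∀ p ∈ l, p.1 = pvGetStr book "name" → p = p0 := by
      intro p hp hpt
      exact List.inj_on_of_nodup_map hnd hp hp0mem (hpt.trans hp0t.symm)
    have hget : (PySem.Dict.mk (l.map pvF)).get? (pvGetStr book "name") = some (pvSelect p0.2) := by
      simp only [PySem.Dict.get?, List.find?_map, hkey, hfind, Option.map_some]
      rfl
    have hcontm : (PySem.Dict.mk (l.map pvF)).contains (pvGetStr book "name") = true := hcont.trans hc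
    have hgetl : (PySem.Dict.mk l).get? (pvGetStr book "name") = some p0.2 := by
      simp [PySem.Dict.get?, hfind]
    simp only [hcontm, not_true, Bool.false_eq_true, if_false, hget, Option.getD_some,
      PySem.Dict.modify, PySem.Dict.getD, hgetl]
    have hsel := pvSelect_append p0.2 hgrp book
    rw [show ((PySem.Chars.strLt (pvYear (pvSelect p0.2)) (pvYear book) && pvIsPdf book)
        || (pvIsPdf book && (PySem.Str.lower (pvGetStr (pvSelect p0.2) "format") != "pdf")))
      = pvCond (pvSelect p0.2) book from rfl]
    rw [show (PySem.Dict.mk l).insert (pvGetStr book "name") (p0.2 ++ [book])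
      = PySem.Dict.mk (l.map (fun p => if p.1 == pvGetStr book "name"
          then (pvGetStr book "name", p0.2 ++ [book]) else p)) by simp [PySem.Dict.insert, hc]]
    cases hcnd : pvCond (pvSelect p0.2) book with
    | true =>
      simp only [if_true, PySem.Dict.insert, hcontm]
      congr 1
      rw [List.map_map, List.map_map]
      refine List.map_congr_left ?_
      intro p hp
      by_cases hpt : p.1 = pvGetStr book "name"
      · have hp0 := huniq p hp hpt
        subst hp0
        simp [Function.comp, pvF, hpt, hsel, hcnd]
      · simp [Function.comp, pvF, hpt]
    | false =>
      simp only [Bool.false_eq_true, if_false]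
      congr 1
      rw [List.map_map]
      conv_lhs => rw [show l.map pvF = l.map (pvF ∘ id) from by simp]
      refine List.map_congr_left ?_
      intro p hp
      by_cases hpt : p.1 = pvGetStr book "name"
      · have hp0 := huniq p hp hpt
        subst hp0
        simp [Function.comp, pvF, hpt, hsel, hcnd]
      · simp [Function.comp, pvF, hpt]

theorem modify_pres (l : List (String × List (List (String × String))))
    (hnd : (l.map Prod.fst).Nodup) (hne : ∀ p ∈ l, p.2 ≠ []) (book : List (String × String)) :
    (((((PySem.Dict.mk l).modify (pvGetStr book "name") [] (· ++ [book])).items).map Prod.fst).Nodup)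
    ∧ (∀ p ∈ ((PySem.Dict.mk l).modify (pvGetStr book "name") [] (· ++ [book])).items, p.2 ≠ []) := by
  simp only [PySem.Dict.modify, PySem.Dict.insert]
  cases hc : (PySem.Dict.mk l).contains (pvGetStr book "name") with
  | false =>
    simp only [Bool.false_eq_true, if_false]
    constructor
    · simp only [List.map_append, List.map_cons, List.map_nil]
      rw [List.nodup_append]
      refine ⟨hnd, by simp, ?_⟩
      simp only [PySem.Dict.contains, List.any_eq_false] at hc
      intro a hmem c hcm heq
      rw [List.mem_singleton] at hcm
      subst hcm
      obtain ⟨p, hp, hp1⟩ := List.mem_map.mp hmem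
      exact absurd (hp1.trans heq) (by simpa using hc p hp)
    · intro p hp
      rcases List.mem_append.mp hp with h | h
      · exact hne p h
      · simp at h
        subst h
        simp
  | true =>
    simp only [if_true]
    constructor
    · have : (l.map (fun p => if (p.1 == pvGetStr book "name") = true
          then (pvGetStr book "name", ((PySem.Dict.mk l).getD (pvGetStr book "name") []) ++ [book]) else p)).map Prod.fst
          = l.map Prod.fst := by
        rw [List.map_map]
        refine List.map_congr_left ?_
        intro p hp
        by_cases hpt : p.1 = pvGetStr book "name" <;> simp [Function.comp, hpt]
      rw [this]
      exact hnd
    · intro p hp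
      obtain ⟨q, hq, hqe⟩ := List.mem_map.mp hp
      by_cases hqt : q.1 = pvGetStr book "name"
      · simp only [hqt, beq_self_eq_true, if_true] at hqe
        subst hqe
        simp
      · rw [if_neg (by simpa using hqt)] at hqe
        subst hqe
        exact hne q hq

theorem main_inv (books : List (List (String × String))) :
    ∀ (l : List (String × List (List (String × String)))),
      (l.map Prod.fst).Nodup → (∀ p ∈ l, p.2 ≠ []) →
      books.foldl
        (fun (unique_books : PySem.Dict String (List (String × String))) book =>
          let title := pvGetStr book "name"
          if ¬ (unique_books.contains title) then
            unique_books.insert title book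
          else
            let existing_book := (unique_books.get? title).getD []
            if (PySem.Chars.strLt (pvYear existing_book) (pvYear book) && pvIsPdf book)
                || (pvIsPdf book && (PySem.Str.lower (pvGetStr existing_book "format") != "pdf")) then
              unique_books.insert title book
            else
              unique_books) ⟨l.map pvF⟩
      = ⟨((books.foldl (fun (g : PySem.Dict String (List (List (String × String)))) book => g.modify (pvGetStr book "name") [] (· ++ [book])) ⟨l⟩).items).map pvF⟩ := by
  induction books with
  | nil => intro l _ _; rfl
  | cons b bs ih =>
    intro l hnd hne
    rw [List.foldl_cons, List.foldl_cons, step_items l hnd hne b]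
    obtain ⟨hnd', hne'⟩ := modify_pres l hnd hne b
    exact ih _ hnd' hne'

theorem foldl_sel (gs : List (List (List (String × String)))) (acc : List (List (String × String))) :
    gs.foldl
      (fun result group =>
        if group.length == 1 then
          result ++ [group.headD []]
        else
          let pdfs := group.filter pvIsPdf
          match PySem.List.max? pdfs pvYear with
          | some m => result ++ [m]
          | none => result ++ [group.headD []]) acc
    = acc ++ gs.map pvSelect := by
  induction gs generalizing acc with
  | nil => simp
  | cons g gs ih =>
    rw [List.foldl_cons, ih]
    have hg : (if g.length == 1 then
          acc ++ [g.headD []]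
        else
          let pdfs := g.filter pvIsPdf
          match PySem.List.max? pdfs pvYear with
          | some m => acc ++ [m]
          | none => acc ++ [g.headD []]) = acc ++ [pvSelect g] := by
      cases hlen : (g.length == 1) with
      | true =>
        match g, hlen with
        | [x], _ => simp [pvSelect_single]
      | false =>
        simp only [Bool.false_eq_true, if_false, pvSelect]
        cases PySem.List.max? (g.filter pvIsPdf) pvYear <;> rfl
    rw [hg]
    simp

-- ===== VERDICT (by name: the statement is the Claim_ definition above) =====
theorem filter_books_spec : Claim_equal_filter_books := by
  intro books _ _
  show filter_books books = filter_books_alt books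
  unfold filter_books filter_books_alt
  rw [foldl_sel]
  have h := main_inv books [] (by simp) (by simp)
  rw [show (PySem.Dict.empty : PySem.Dict String (List (String × String)))
      = (⟨List.map pvF []⟩ : PySem.Dict String (List (String × String))) from rfl, h]
  simp only [PySem.Dict.values, List.map_map, List.nil_append]
  rfl
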